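/- GENERATED by farm/mkstatement.py from design/units.tsv (unit `DGifGetCodeNext.COMPOSITION`) and the Specs of Gif/Spec/*.lean — do not edit.
   THE STATEMENT of the proof unit `DGifGetCodeNext.COMPOSITION`: the function `DGifGetCodeNext` (76 instructions) satisfies its contract,
   GIVEN THE STATEMENTS OF ITS 4 SEGMENTS (`Gif.Spec.DGifGetCodeNext.Seg<k> Lay μ u₀`: what the unit `DGifGetCodeNext.<k>` proves).
   No machine code is walked: `ReachVia.trans` along the segments (the exit assertion of a segment is the entry assertion of
   its successor), an induction on the loop measures. What the names mean: ProgX/Base/Spec/Basic.lean. The theorem to prove: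
   `theorem DGifGetCodeNext_COMPOSITION_ok : Gif.Spec.DGifGetCodeNext_COMPOSITION.Statement`. -/
import Gif.Code
import Gif.Dec.All
import Gif.Labels
import Gif.Spec.Reader
import Gif.Spec.Seg_DGifGetCodeNext
namespace Gif.Spec.DGifGetCodeNext_COMPOSITION
open X86 X86.User Asan

/-- The statement of unit `DGifGetCodeNext.COMPOSITION`. -/
def Statement : Prop :=
  ∀ (Lay : Layout) (_hLay : Lay.hi = 0x1000000) (μ : Microarch) (_hμ : UserX.MicroOK μ) (u₀ : State)
    (_h_DGifGetCodeNext_P : Gif.Spec.DGifGetCodeNext.SegP Lay μ u₀)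
    (_h_DGifGetCodeNext_1 : Gif.Spec.DGifGetCodeNext.Seg1 Lay μ u₀)
    (_h_DGifGetCodeNext_2 : Gif.Spec.DGifGetCodeNext.Seg2 Lay μ u₀)
    (_h_DGifGetCodeNext_E : Gif.Spec.DGifGetCodeNext.SegE Lay μ u₀),
    ∀ (H : Heap) (rest : List Obj) (frames : List (Nat × FrameLayout)) (F : Forest) (R : Rd), Calls Lay μ ProgX.Base.WayInv (ProgX.Base.conv u₀) Gif.L.DGifGetCodeNext.entry (Gif.Spec.DGifGetCodeNext.spec H rest frames F R)

end Gif.Spec.DGifGetCodeNext_COMPOSITION
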